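-- pv_equiv track=rewrite | github.com/jiaqingxie/OmniGen | src/validators/qa_pair_validator.py | _validate_speaker_alternation
-- ===== SOURCE A (Python) =====
-- from typing import Dict, Any, List
--
-- def _validate_speaker_alternation(speaker_pattern: List[str]) -> bool:
--     """Validate that speakers alternate properly"""
--     if len(speaker_pattern) < 2:
--         return False
--
--     # Check that we start with human and alternate
--     for i, speaker in enumerate(speaker_pattern):
--         expected_speaker = "human" if i % 2 == 0 else "gpt"
--         if speaker != expected_speaker:
--             return False
--
--     return True
-- ===== SOURCE B (Python) =====
-- from typing import List
--
-- def _validate_speaker_alternation(speaker_pattern: List[str]) -> bool: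
--     """Validate that speakers alternate properly (even/odd slice decomposition)."""
--     if len(speaker_pattern) < 2:
--         return False
--     return (all(s == "human" for s in speaker_pattern[0::2])
--             and all(s == "gpt" for s in speaker_pattern[1::2]))
-- ===== Notes on version B (the rewrite author's own statement) =====
-- stated objective: alternative
-- what changed: Replaced the single indexed loop computing a parity per element by splitting the list into its even-index and odd-index slices and checking each slice against one constant speaker.
import Mathlib
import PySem

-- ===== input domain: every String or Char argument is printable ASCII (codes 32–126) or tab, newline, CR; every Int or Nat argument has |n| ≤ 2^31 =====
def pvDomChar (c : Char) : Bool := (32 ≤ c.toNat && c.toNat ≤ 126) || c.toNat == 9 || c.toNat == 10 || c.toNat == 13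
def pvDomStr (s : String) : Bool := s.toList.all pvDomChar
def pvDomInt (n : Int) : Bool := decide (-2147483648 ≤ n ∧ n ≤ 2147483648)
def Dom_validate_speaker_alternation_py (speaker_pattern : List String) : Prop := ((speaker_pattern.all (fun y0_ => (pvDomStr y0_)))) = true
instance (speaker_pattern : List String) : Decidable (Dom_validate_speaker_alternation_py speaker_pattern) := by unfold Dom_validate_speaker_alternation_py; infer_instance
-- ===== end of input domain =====

-- B checks the even-index and odd-index slices each against one constant speaker instead of A's single indexed loop (alternative decomposition, same cost).
-- ===== PORT A =====
-- the indexed loop of A with early return: i is the enumerate index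
def pvLoopA : Nat → List String → Bool
  | _, [] => true
  | i, s :: rest =>
      let expected := if i % 2 = 0 then "human" else "gpt"
      if s ≠ expected then false else pvLoopA (i + 1) rest

def validate_speaker_alternation_py (speaker_pattern : List String) : Bool :=
  if speaker_pattern.length < 2 then false
  else pvLoopA 0 speaker_pattern

-- ===== PORT B =====
-- pvEveryOther xs is exactly the step-2 slice xs[0::2] (PySem has no step-2 slice primitive)
def pvEveryOther {α : Type} : List α → List α
  | [] => []
  | [x] => [x]
  | x :: _ :: xs => x :: pvEveryOther xs

def validate_speaker_alternation_py_alt (speaker_pattern : List String) : Bool :=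
  if speaker_pattern.length < 2 then false
  else (pvEveryOther speaker_pattern).all (fun s => s == "human")
       && (pvEveryOther speaker_pattern.tail).all (fun s => s == "gpt")

-- ===== PRECONDITION & SPEC =====
def Spec_validate_speaker_alternation_py (speaker_pattern : List String) (out : Bool) : Prop := out = validate_speaker_alternation_py_alt speaker_pattern
instance (speaker_pattern : List String) (out : Bool) : Decidable (Spec_validate_speaker_alternation_py speaker_pattern out) := by unfold Spec_validate_speaker_alternation_py; infer_instance

-- ===== CLAIM (what is proved, stated in full; the proofs are below) =====
def Claim_equal_validate_speaker_alternation_py : Prop := ∀ (speaker_pattern : List String), Dom_validate_speaker_alternation_py speaker_pattern → Spec_validate_speaker_alternation_py speaker_pattern (validate_speaker_alternation_py speaker_pattern)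

-- ===== LEMMAS AND PROOFS =====

-- ===== VERDICT (by name: the statement is the Claim_ definition above) =====
lemma pvEveryOther_cons {α : Type} (x : α) (t : List α) :
    pvEveryOther (x :: t) = x :: pvEveryOther t.tail := by
  cases t <;> simp [pvEveryOther]

lemma pvLoopA_eq (xs : List String) : ∀ i : Nat,
    pvLoopA i xs =
      ((pvEveryOther xs).all (fun s => s == (if i % 2 = 0 then "human" else "gpt"))
        && (pvEveryOther xs.tail).all (fun s => s == (if i % 2 = 0 then "gpt" else "human"))) := by
  induction xs with
  | nil => intro i; simp [pvLoopA, pvEveryOther]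
  | cons x t ih =>
      intro i
      rcases Nat.mod_two_eq_zero_or_one i with h | h <;>
      · have hpar : (i + 1) % 2 = 1 - i % 2 := by omega
        simp only [pvLoopA, pvEveryOther_cons, List.tail_cons, List.all_cons,
          ih (i + 1), hpar, h]
        by_cases hx : x = (if i % 2 = 0 then "human" else "gpt") <;>
          simp_all [Bool.and_comm, Bool.and_left_comm]

theorem validate_speaker_alternation_py_spec : Claim_equal_validate_speaker_alternation_py := by
  intro sp _
  unfold Spec_validate_speaker_alternation_py validate_speaker_alternation_py validate_speaker_alternation_py_alt
  by_cases h : sp.length < 2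
  · simp [h]
  · simp only [h, if_false, pvLoopA_eq sp 0]
    simp
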